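-- pv_equiv track=rewrite | github.com/Indspl0it/blue-tap | blue_tap/modules/post_exploitation/data/bluesnarfer.py | parse_sms_response
-- ===== SOURCE A (Python) =====
-- def parse_sms_response(response: str) -> list[dict]:
--     messages = []
--     lines = (response or "").splitlines()
--     i = 0
--     while i < len(lines):
--         line = lines[i].strip()
--         if line.startswith("+CMGL:"):
--             payload = line.split(":", 1)[1].strip()
--             header_parts = [part.strip() for part in payload.split(",", 4)]
--             msg = {
--                 "index": header_parts[0] if len(header_parts) > 0 else "",
--                 "status": header_parts[1].strip('"') if len(header_parts) > 1 else "",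
--                 "sender": header_parts[2].strip('"') if len(header_parts) > 2 else "",
--                 "alpha": header_parts[3].strip('"') if len(header_parts) > 3 else "",
--                 "timestamp": header_parts[4].strip('"') if len(header_parts) > 4 else "",
--                 "body": "",
--             }
--             i += 1
--             body_lines = []
--             while i < len(lines):
--                 next_line = lines[i].strip()
--                 if next_line.startswith("+CMGL:") or next_line == "OK" or next_line == "ERROR":
--                     break
--                 body_lines.append(lines[i].rstrip())
--                 i += 1
--             msg["body"] = "\n".join(body_lines).strip()
--             messages.append(msg)
--             continue
--         i += 1
--     return messages
-- ===== SOURCE B (Python) =====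
-- def _parse_header(stripped_line: str) -> dict:
--     payload = stripped_line.split(":", 1)[1].strip()
--     parts = [p.strip() for p in payload.split(",", 4)]
--     keys = ["index", "status", "sender", "alpha", "timestamp"]
--     msg = {}
--     for j, key in enumerate(keys):
--         value = parts[j] if j < len(parts) else ""
--         msg[key] = value if j == 0 else value.strip('"')
--     return msg
--
--
-- def parse_sms_response(response: str) -> list[dict]:
--     messages = []
--     current = None
--     body_lines = []
--
--     def flush():
--         nonlocal current, body_lines
--         if current is not None:
--             current["body"] = "\n".join(body_lines).strip()
--             messages.append(current)
--         current = None
--         body_lines = []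
--
--     for raw in (response or "").splitlines():
--         stripped = raw.strip()
--         if stripped.startswith("+CMGL:"):
--             flush()
--             current = _parse_header(stripped)
--         elif stripped == "OK" or stripped == "ERROR":
--             flush()
--         elif current is not None:
--             body_lines.append(raw.rstrip())
--     flush()
--     return messages
-- ===== Notes on version B (the rewrite author's own statement) =====
-- stated objective: simpler
-- what changed: Replaces A's nested index-tracking while loops by a single flat pass over the lines maintaining a current-message/body-lines state that is flushed at headers, OK/ERROR and end of input, with header parsing factored into a key-loop helper.
import Mathlib
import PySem

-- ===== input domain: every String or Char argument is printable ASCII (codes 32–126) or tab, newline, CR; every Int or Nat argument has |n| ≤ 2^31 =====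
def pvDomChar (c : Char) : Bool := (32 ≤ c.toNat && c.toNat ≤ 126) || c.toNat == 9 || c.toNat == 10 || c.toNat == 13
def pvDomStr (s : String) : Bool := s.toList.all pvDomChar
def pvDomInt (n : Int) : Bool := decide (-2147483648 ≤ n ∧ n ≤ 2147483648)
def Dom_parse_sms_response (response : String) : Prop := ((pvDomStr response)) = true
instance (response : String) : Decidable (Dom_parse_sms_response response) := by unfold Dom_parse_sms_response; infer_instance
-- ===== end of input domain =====

-- B replaces A's nested index-tracking while loops by one flat fold over the lines with a
-- current-message/body accumulator state (objective: simpler decomposition, same cost).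

-- ===== PORT A =====
-- classification of a line by A's inner while-loop break condition
def pvKeepBody (l : String) : Bool :=
  !(PySem.Str.startswith (PySem.Str.strip l) "+CMGL:" ||
    (PySem.Str.strip l == "OK" || PySem.Str.strip l == "ERROR"))

-- A's header parsing, inlined in A's outer loop body (shared shape with nothing of B)
def pvMsgA (line : String) : PySem.Dict String String :=
  let payload := PySem.Str.strip ((((PySem.Str.splitMax? line ":" 1).getD [])).getD 1 "")
  let header_parts := ((PySem.Str.splitMax? payload "," 4).getD []).map PySem.Str.strip
  PySem.Dict.mk
    [ ("index", if 0 < header_parts.length then header_parts.getD 0 "" else ""),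
      ("status", if 1 < header_parts.length then PySem.Str.stripChars (header_parts.getD 1 "") "\"" else ""),
      ("sender", if 2 < header_parts.length then PySem.Str.stripChars (header_parts.getD 2 "") "\"" else ""),
      ("alpha", if 3 < header_parts.length then PySem.Str.stripChars (header_parts.getD 3 "") "\"" else ""),
      ("timestamp", if 4 < header_parts.length then PySem.Str.stripChars (header_parts.getD 4 "") "\"" else ""),
      ("body", "") ]

-- A's outer while loop: the inner while (break on +CMGL:/OK/ERROR, else append lines[i].rstrip())
-- is takeWhile/dropWhile on the same break condition, mapping rstrip over the lines taken
def pvGoA : List String → List (List (String × String))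
  | [] => []
  | l :: rest =>
    let line := PySem.Str.strip l
    if PySem.Str.startswith line "+CMGL:" then
      let body_lines := (rest.takeWhile pvKeepBody).map PySem.Str.rstrip
      let msg := (pvMsgA line).insert "body" (PySem.Str.strip (PySem.Str.join "\n" body_lines))
      msg.items :: pvGoA (rest.dropWhile pvKeepBody)
    else pvGoA rest
termination_by ls => ls.length
decreasing_by
  · have := List.length_dropWhile_le pvKeepBody rest; simp; omega
  · simp

def parse_sms_response (response : String) : List (List (String × String)) :=
  pvGoA (PySem.Str.splitlines response)   -- (response or "") is the identity on str

-- ===== PORT B =====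
-- B's _parse_header: a loop over enumerate(keys) inserting each field
def pvHdrB (stripped : String) : PySem.Dict String String :=
  let payload := PySem.Str.strip ((((PySem.Str.splitMax? stripped ":" 1).getD [])).getD 1 "")
  let parts := ((PySem.Str.splitMax? payload "," 4).getD []).map PySem.Str.strip
  let keys := ["index", "status", "sender", "alpha", "timestamp"]
  (PySem.List.enumerate keys).foldl
    (fun d jk =>
      let value := if jk.1 < (parts.length : Int) then (PySem.List.pyGet? parts jk.1).getD "" else ""
      d.insert jk.2 (if jk.1 = 0 then value else PySem.Str.stripChars value "\""))
    PySem.Dict.empty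

-- B's state: (messages, current, body_lines)
def pvStB := List (List (String × String)) × Option (PySem.Dict String String) × List String

def pvFlush (st : pvStB) : pvStB :=
  match st.2.1 with
  | none => (st.1, none, [])
  | some d =>
      (st.1 ++ [(d.insert "body" (PySem.Str.strip (PySem.Str.join "\n" st.2.2))).items], none, [])

def pvStepB (st : pvStB) (raw : String) : pvStB :=
  let stripped := PySem.Str.strip raw
  if PySem.Str.startswith stripped "+CMGL:" then
    let st' := pvFlush st
    (st'.1, some (pvHdrB stripped), st'.2.2)
  else if stripped == "OK" || stripped == "ERROR" then pvFlush st
  else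
    match st.2.1 with
    | some _ => (st.1, st.2.1, st.2.2 ++ [PySem.Str.rstrip raw])
    | none => st

def parse_sms_response_alt (response : String) : List (List (String × String)) :=
  (pvFlush ((PySem.Str.splitlines response).foldl pvStepB ([], none, []))).1

-- ===== PRECONDITION & SPEC =====
def Spec_parse_sms_response (response : String) (out : List (List (String × String))) : Prop := out = parse_sms_response_alt response
instance (response : String) (out : List (List (String × String))) : Decidable (Spec_parse_sms_response response out) := by unfold Spec_parse_sms_response; infer_instance

-- ===== CLAIM (what is proved, stated in full; the proofs are below) =====
def Claim_equal_parse_sms_response : Prop := ∀ (response : String), Dom_parse_sms_response response → Spec_parse_sms_response response (parse_sms_response response)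

-- ===== LEMMAS AND PROOFS =====
-- A's per-message dict equals B's, for any header-parts list (same fields, "body" overwritten last)
lemma msg_core (ps : List String) (b : String) :
    (PySem.Dict.mk
      [ ("index", if 0 < ps.length then ps.getD 0 "" else ""),
        ("status", if 1 < ps.length then PySem.Str.stripChars (ps.getD 1 "") "\"" else ""),
        ("sender", if 2 < ps.length then PySem.Str.stripChars (ps.getD 2 "") "\"" else ""),
        ("alpha", if 3 < ps.length then PySem.Str.stripChars (ps.getD 3 "") "\"" else ""),
        ("timestamp", if 4 < ps.length then PySem.Str.stripChars (ps.getD 4 "") "\"" else ""),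
        ("body", "") ]).insert "body" b
    = ((PySem.List.enumerate ["index", "status", "sender", "alpha", "timestamp"]).foldl
        (fun d jk =>
          let value := if jk.1 < (ps.length : Int) then (PySem.List.pyGet? ps jk.1).getD "" else ""
          d.insert jk.2 (if jk.1 = 0 then value else PySem.Str.stripChars value "\""))
        PySem.Dict.empty).insert "body" b := by
  simp only [PySem.List.enumerate, List.foldl]
  simp [PySem.Dict.insert, PySem.Dict.empty, List.getD_eq_getElem?_getD]
  norm_cast
  refine ⟨?_, ?_, ?_, ?_, ?_⟩ <;> split_ifs with h <;>
    first | decide | simp [h]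

lemma msg_eq (line : String) (b : String) :
    (pvMsgA line).insert "body" b = (pvHdrB line).insert "body" b := by
  simp only [pvMsgA, pvHdrB]
  exact msg_core _ b

lemma key_lemma (lines : List String) (acc : List (List (String × String)))
    (cur : Option (PySem.Dict String String)) (body : List String) :
    (pvFlush (lines.foldl pvStepB (acc, cur, body))).1
      = acc ++ (match cur with
        | none => pvGoA lines
        | some d =>
            (d.insert "body" (PySem.Str.strip (PySem.Str.join "\n"
              (body ++ (lines.takeWhile pvKeepBody).map PySem.Str.rstrip)))).items
              :: pvGoA (lines.dropWhile pvKeepBody)) := by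
  induction lines generalizing acc cur body with
  | nil =>
      cases cur <;> simp [pvFlush, pvGoA]
  | cons l rest ih =>
      rw [List.foldl_cons]
      rcases hh : PySem.Str.startswith (PySem.Str.strip l) "+CMGL:" with _ | _
      · rcases ho : (PySem.Str.strip l == "OK" || PySem.Str.strip l == "ERROR") with _ | _
        · -- plain body / ignored line
          have hk : pvKeepBody l = true := by
            simp only [pvKeepBody, hh, ho, Bool.false_or, Bool.not_false]
          have hg : pvGoA (l :: rest) = pvGoA rest := by
            simp only [pvGoA, hh]; rfl
          cases cur with
          | none =>
              have hstep : pvStepB (acc, none, body) l = (acc, none, body) := by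
                simp only [pvStepB, hh, ho]; rfl
              rw [hstep, ih]
              simp [hg]
          | some d =>
              have hstep : pvStepB (acc, some d, body) l
                  = (acc, some d, body ++ [PySem.Str.rstrip l]) := by
                simp only [pvStepB, hh, ho]; rfl
              rw [hstep, ih]
              simp [hk]
        · -- OK / ERROR line
          have hk : pvKeepBody l = false := by
            simp only [pvKeepBody, hh, ho, Bool.or_true, Bool.not_true]
          have hg : pvGoA (l :: rest) = pvGoA rest := by
            simp only [pvGoA, hh]; rfl
          have hne : ¬ (PySem.Str.strip l == "OK" || PySem.Str.strip l == "ERROR") = false := by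
            simp [ho]
          cases cur with
          | none =>
              have hstep : pvStepB (acc, none, body) l = (acc, none, []) := by
                simp only [pvStepB, hh, ho, pvFlush]; rfl
              rw [hstep, ih]
              simp [hg]
          | some d =>
              have hstep : pvStepB (acc, some d, body) l
                  = (acc ++ [(d.insert "body"
                      (PySem.Str.strip (PySem.Str.join "\n" body))).items], none, []) := by
                simp only [pvStepB, hh, ho, pvFlush]; rfl
              rw [hstep, ih]
              simp [hk, hg]
      · -- header line
        have hk : pvKeepBody l = false := by
          simp only [pvKeepBody, hh, Bool.true_or, Bool.not_true]
        have hgo : pvGoA (l :: rest)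
            = ((pvMsgA (PySem.Str.strip l)).insert "body"
                (PySem.Str.strip (PySem.Str.join "\n"
                  ((rest.takeWhile pvKeepBody).map PySem.Str.rstrip)))).items
              :: pvGoA (rest.dropWhile pvKeepBody) := by
          simp only [pvGoA]; rw [if_pos hh]
        cases cur with
        | none =>
            have hstep : pvStepB (acc, none, body) l
                = (acc, some (pvHdrB (PySem.Str.strip l)), []) := by
              simp only [pvStepB, hh, pvFlush]; rfl
            rw [hstep, ih]
            simp [hgo, msg_eq]
        | some d =>
            have hstep : pvStepB (acc, some d, body) l
                = (acc ++ [(d.insert "body"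
                    (PySem.Str.strip (PySem.Str.join "\n" body))).items],
                   some (pvHdrB (PySem.Str.strip l)), []) := by
              simp only [pvStepB, hh, pvFlush]; rfl
            rw [hstep, ih]
            simp [hk, hgo, msg_eq]

-- ===== VERDICT (by name: the statement is the Claim_ definition above) =====
theorem parse_sms_response_spec : Claim_equal_parse_sms_response := by
  intro response _
  unfold Spec_parse_sms_response parse_sms_response parse_sms_response_alt
  rw [key_lemma]
  simp
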